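-- pv_equiv track=rewrite | github.com/ycsama0703/KOL-Driven-Trading-System | ranking_backtest/LLMBacktest/AI-Trader/data/crypto/synthesize_crypto_index_daily.py | get_common_timestamps
-- ===== SOURCE A (Python) =====
-- def get_common_timestamps(crypto_data):
--     """Find common timestamps across all cryptocurrencies"""
--     if not crypto_data:
--         return []
--
--     # Get timestamps from first crypto
--     first_crypto = list(crypto_data.keys())[0]
--     common_timestamps = set(crypto_data[first_crypto]['time_series'].keys())
--
--     # Find intersection with all other cryptos
--     for crypto_name in crypto_data.keys():
--         if crypto_name != first_crypto:
--             timestamps = set(crypto_data[crypto_name]['time_series'].keys())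
--             common_timestamps.intersection_update(timestamps)
--
--     return sorted(common_timestamps)
-- ===== SOURCE B (Python) =====
-- def get_common_timestamps(crypto_data):
--     """Find common timestamps across all cryptocurrencies"""
--     if not crypto_data:
--         return []
--     n = len(crypto_data)
--     counts = {}
--     for crypto in crypto_data.values():
--         for ts in crypto['time_series'].keys():
--             counts[ts] = counts.get(ts, 0) + 1
--     return sorted(ts for ts, c in counts.items() if c == n)
-- ===== Notes on version B (the rewrite author's own statement) =====
-- stated objective: alternative
-- what changed: Replaces the repeated set-intersection strategy (build first crypto's timestamp set, intersection_update against every other crypto) with a single counting pass: one dict counts every timestamp's occurrences across all cryptos, and a timestamp is common iff its count equals len(crypto_data).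
import Mathlib
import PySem

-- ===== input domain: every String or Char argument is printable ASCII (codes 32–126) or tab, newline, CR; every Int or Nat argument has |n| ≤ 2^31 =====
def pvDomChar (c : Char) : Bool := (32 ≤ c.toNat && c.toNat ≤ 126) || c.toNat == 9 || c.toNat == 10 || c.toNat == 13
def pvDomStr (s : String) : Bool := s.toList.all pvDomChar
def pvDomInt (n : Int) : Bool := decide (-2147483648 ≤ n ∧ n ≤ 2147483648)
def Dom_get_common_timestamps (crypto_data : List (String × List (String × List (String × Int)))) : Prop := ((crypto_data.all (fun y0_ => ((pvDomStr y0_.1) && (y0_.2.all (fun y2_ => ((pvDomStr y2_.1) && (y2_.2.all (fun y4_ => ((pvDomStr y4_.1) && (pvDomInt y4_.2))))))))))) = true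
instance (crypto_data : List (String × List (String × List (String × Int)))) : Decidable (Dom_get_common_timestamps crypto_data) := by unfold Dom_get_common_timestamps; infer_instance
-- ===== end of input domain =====

-- B replaces A's repeated set-intersection with a single counting pass (count each timestamp
-- across all cryptos, keep those whose count equals the number of cryptos); alternative algorithm,
-- similar cost.


-- ===== PORT A =====
-- shared helper: crypto['time_series']  (total form of the dict lookup; Pre_ guarantees the key is present)
def pvTs (v : List (String × List (String × Int))) : List (String × Int) :=
  (PySem.Dict.mk v).getD "time_series" []

def get_common_timestamps (crypto_data : List (String × List (String × List (String × Int)))) : List String :=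
  if crypto_data = [] then []
  else
    let d := PySem.Dict.mk crypto_data
    let first_crypto := d.keys.headD ""          -- list(crypto_data.keys())[0]; keys ≠ [] here
    let common0 : PySem.Set String := PySem.Set.ofList ((pvTs (d.getD first_crypto [])).map Prod.fst)
    let common := d.keys.foldl (fun c crypto_name =>
        if crypto_name ≠ first_crypto then
          PySem.Set.inter c (PySem.Set.ofList ((pvTs (d.getD crypto_name [])).map Prod.fst))
        else c) common0
    PySem.List.sorted common (fun x => x) false

-- ===== PORT B =====
def get_common_timestamps_alt (crypto_data : List (String × List (String × List (String × Int)))) : List String :=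
  if crypto_data = [] then []
  else
    let d := PySem.Dict.mk crypto_data
    let n : Int := d.size
    let counts := d.values.foldl (fun cnts crypto =>
        ((pvTs crypto).map Prod.fst).foldl (fun cnts ts => cnts.modify ts 0 (· + 1)) cnts)
      (PySem.Dict.empty : PySem.Dict String Int)
    PySem.List.sorted ((counts.items.filter (fun p => p.2 == n)).map Prod.fst) (fun x => x) false

-- ===== PRECONDITION & SPEC =====
-- Pre_ excludes (a) inputs where A raises KeyError (some crypto's dict lacks the key
-- "time_series") and (b) association lists with duplicate keys at some dict level, which do not
-- represent any Python dict (Python collapses them on construction, so A never receives them).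
def Pre_get_common_timestamps (crypto_data : List (String × List (String × List (String × Int)))) : Prop :=
  (crypto_data.map Prod.fst).Nodup ∧
  ∀ p ∈ crypto_data,
    (p.2.map Prod.fst).Nodup ∧
    (PySem.Dict.mk p.2).contains "time_series" = true ∧
    ((pvTs p.2).map Prod.fst).Nodup
instance (crypto_data : List (String × List (String × List (String × Int)))) : Decidable (Pre_get_common_timestamps crypto_data) := by unfold Pre_get_common_timestamps; infer_instance

def pvWitness_get_common_timestamps : (List (String × List (String × List (String × Int)))) :=
  [("BTC", [("time_series", [("2024-01-01", 1), ("2024-01-02", 2)])]),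
   ("ETH", [("time_series", [("2024-01-02", 3)])])]

def Spec_get_common_timestamps (crypto_data : List (String × List (String × List (String × Int)))) (out : List String) : Prop := out = get_common_timestamps_alt crypto_data
instance (crypto_data : List (String × List (String × List (String × Int)))) (out : List String) : Decidable (Spec_get_common_timestamps crypto_data out) := by unfold Spec_get_common_timestamps; infer_instance

-- ===== CLAIM (what is proved, stated in full; the proofs are below) =====
def Claim_equal_get_common_timestamps : Prop := ∀ (crypto_data : List (String × List (String × List (String × Int)))), Dom_get_common_timestamps crypto_data → Pre_get_common_timestamps crypto_data → Spec_get_common_timestamps crypto_data (get_common_timestamps crypto_data)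

-- ===== LEMMAS AND PROOFS =====

-- membership in A's intersection fold
theorem pv_mem_foldl_inter (f : String → PySem.Set String) (first : String) (x : String) :
    ∀ (l : List String) (init : PySem.Set String),
    (x ∈ l.foldl (fun c name => if name ≠ first then PySem.Set.inter c (f name) else c) init
      ↔ x ∈ init ∧ ∀ name ∈ l, name ≠ first → x ∈ f name) := by
  intro l
  induction l with
  | nil => intro init; simp
  | cons a l ih =>
    intro init
    rw [List.foldl_cons, ih]
    by_cases ha : a ≠ first
    · rw [if_pos ha, PySem.Set.mem_inter]
      constructor
      · rintro ⟨⟨h1, h2⟩, h3⟩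
        refine ⟨h1, fun name hn hne => ?_⟩
        rcases List.mem_cons.mp hn with rfl | hn'
        · exact h2
        · exact h3 name hn' hne
      · rintro ⟨h1, h2⟩
        exact ⟨⟨h1, h2 a List.mem_cons_self ha⟩,
          fun name hn hne => h2 name (List.mem_cons_of_mem _ hn) hne⟩
    · rw [if_neg ha]
      constructor
      · rintro ⟨h1, h2⟩
        refine ⟨h1, fun name hn hne => ?_⟩
        rcases List.mem_cons.mp hn with rfl | hn'
        · exact absurd hne ha
        · exact h2 name hn' hne
      · rintro ⟨h1, h2⟩
        exact ⟨h1, fun name hn hne => h2 name (List.mem_cons_of_mem _ hn) hne⟩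

-- nodup is preserved by A's intersection fold
theorem pv_nodup_foldl_inter (f : String → PySem.Set String) (first : String) :
    ∀ (l : List String) (init : PySem.Set String), init.Nodup →
    (l.foldl (fun c name => if name ≠ first then PySem.Set.inter c (f name) else c) init).Nodup := by
  intro l
  induction l with
  | nil => intro init h; simpa using h
  | cons a l ih =>
    intro init h
    simp only [List.foldl_cons]
    apply ih
    split
    · exact PySem.Set.nodup_inter _ _ h
    · exact h

-- nested foldl over a list of lists = foldl over the flatMap
theorem pv_foldl_foldl_flatMap {α β γ : Type} (g : β → List α) (f : γ → α → γ) :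
    ∀ (l : List β) (init : γ),
    l.foldl (fun c v => (g v).foldl f c) init = (l.flatMap g).foldl f init := by
  intro l
  induction l with
  | nil => intro init; simp
  | cons a l ih => intro init; simp [List.flatMap_cons, List.foldl_append, ih]

-- the flatMap's count is bounded by the number of blocks when each block is nodup
theorem pv_count_flatMap_le {β : Type} (g : β → List String) (x : String) :
    ∀ (l : List β), (∀ v ∈ l, (g v).Nodup) →
    List.count x (l.flatMap g) ≤ l.length := by
  intro l
  induction l with
  | nil => simp
  | cons a l ih =>
    intro h
    simp only [List.flatMap_cons, List.count_append, List.length_cons]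
    have h1 : List.count x (g a) ≤ 1 := by
      by_cases hm : x ∈ g a
      · exact le_of_eq (List.count_eq_one_of_mem (h a (List.mem_cons_self)) hm)
      · simp [List.count_eq_zero_of_not_mem hm]
    have h2 := ih (fun v hv => h v (List.mem_cons_of_mem _ hv))
    omega

-- the flatMap's count reaches the number of blocks iff x is in every block
theorem pv_count_flatMap_eq_iff {β : Type} (g : β → List String) (x : String) :
    ∀ (l : List β), (∀ v ∈ l, (g v).Nodup) →
    (List.count x (l.flatMap g) = l.length ↔ ∀ v ∈ l, x ∈ g v) := by
  intro l
  induction l with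
  | nil => simp
  | cons a l ih =>
    intro h
    have hnd := h a (List.mem_cons_self)
    have hrest := fun v hv => h v (List.mem_cons_of_mem _ hv)
    have hle1 : List.count x (g a) ≤ 1 := by
      by_cases hm : x ∈ g a
      · exact le_of_eq (List.count_eq_one_of_mem hnd hm)
      · simp [List.count_eq_zero_of_not_mem hm]
    have hle2 := pv_count_flatMap_le g x l hrest
    simp only [List.flatMap_cons, List.count_append, List.length_cons, List.mem_cons]
    constructor
    · intro heq
      have ha : List.count x (g a) = 1 := by omega
      have hl : List.count x (l.flatMap g) = l.length := by omega
      have hma : x ∈ g a := by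
        by_contra hm
        simp [List.count_eq_zero_of_not_mem hm] at ha
      refine fun v hv => ?_
      rcases hv with rfl | hv
      · exact hma
      · exact ((ih hrest).mp hl) v hv
    · intro hall
      have ha : List.count x (g a) = 1 :=
        List.count_eq_one_of_mem hnd (hall a (Or.inl rfl))
      have hl : List.count x (l.flatMap g) = l.length :=
        (ih hrest).mpr (fun v hv => hall v (Or.inr hv))
      omega


-- ===== VERDICT (by name: the statement is the Claim_ definition above) =====
theorem get_common_timestamps_spec : Claim_equal_get_common_timestamps := by
  intro cd _hdom hpre
  unfold Spec_get_common_timestamps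
  by_cases hcd : cd = []
  · subst hcd; rfl
  · obtain ⟨hnodup, hp⟩ := hpre
    -- notation
    set d := PySem.Dict.mk cd with hd
    have hitems : d.items = cd := rfl
    have hkeys : d.keys = cd.map Prod.fst := rfl
    have hvalues : d.values = cd.map Prod.snd := rfl
    have hsize : d.size = cd.length := by simp [PySem.Dict.size, hitems]
    have hkeysnd : d.keys.Nodup := by rw [hkeys]; exact hnodup
    have hlookup : ∀ p ∈ cd, d.getD p.1 [] = p.2 := by
      intro p hpm
      exact PySem.Dict.getD_of_mem_items d (by rw [hitems]; exact (by simpa using hpm)) hkeysnd []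
    have hkne : d.keys ≠ [] := by
      rw [hkeys]; simpa using hcd
    -- the shared per-crypto timestamp key list
    set g : List (String × List (String × Int)) → List String :=
      fun v => (pvTs v).map Prod.fst with hg
    -- first crypto
    set first := d.keys.headD "" with hfirst
    have hfirstmem : first ∈ d.keys := by
      rw [hfirst, List.headD_eq_head?, List.head?_eq_some_head hkne]
      simp [List.head_mem]
    -- A's accumulated set
    set f : String → PySem.Set String := fun name => PySem.Set.ofList (g (d.getD name [])) with hf
    set S := d.keys.foldl (fun c name => if name ≠ first then PySem.Set.inter c (f name) else c) (f first) with hS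
    have hAmem : ∀ x, x ∈ S ↔ ∀ p ∈ cd, x ∈ g p.2 := by
      intro x
      rw [hS, pv_mem_foldl_inter]
      constructor
      · rintro ⟨hinit, hrest⟩ p hpm
        have hgp : g (d.getD p.1 []) = g p.2 := by rw [hlookup p hpm]
        by_cases hne : p.1 ≠ first
        · have := hrest p.1 (by rw [hkeys]; exact List.mem_map_of_mem hpm) hne
          rw [hf] at this
          rw [← hgp]
          simpa [PySem.Set.mem_ofList] using this
        · rw [Decidable.not_not] at hne
          rw [hf] at hinit
          rw [← hgp, hne]
          simpa [PySem.Set.mem_ofList] using hinit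
      · intro hall
        have hmemf : ∀ name ∈ d.keys, x ∈ f name := by
          intro name hnm
          rw [hkeys] at hnm
          obtain ⟨p, hpm, rfl⟩ := List.mem_map.mp hnm
          rw [hf]
          simp only [PySem.Set.mem_ofList]
          rw [hlookup p hpm]
          exact hall p hpm
        exact ⟨hmemf first hfirstmem, fun name hnm _ => hmemf name hnm⟩
    have hAnodup : S.Nodup := by
      rw [hS]
      exact pv_nodup_foldl_inter f first d.keys (f first) (PySem.Set.nodup_ofList _)
    -- B's counter
    set flat := (cd.map Prod.snd).flatMap g with hflat
    have hblocknd : ∀ v ∈ cd.map Prod.snd, (g v).Nodup := by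
      intro v hv
      obtain ⟨p, hpm, rfl⟩ := List.mem_map.mp hv
      exact (hp p hpm).2.2
    have hcounts : d.values.foldl (fun cnts crypto =>
        (g crypto).foldl (fun cnts ts => cnts.modify ts 0 (· + 1)) cnts)
        (PySem.Dict.empty : PySem.Dict String Int) = PySem.Dict.counter flat := by
      rw [hvalues, pv_foldl_foldl_flatMap, ← hflat, PySem.Dict.counter_eq_foldl]
    set n : Int := (d.size : Int) with hn
    have hLB : (((PySem.Dict.counter flat).items.filter (fun p => p.2 == n)).map Prod.fst)
        = (PySem.Set.ofList flat).filter (fun k => ((flat.count k : Int) == n)) := by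
      rw [PySem.Dict.items_counter, List.filter_map, List.map_map]
      simp [Function.comp_def]
    have hBnodup : ((PySem.Set.ofList flat).filter (fun k => ((flat.count k : Int) == n))).Nodup :=
      (PySem.Set.nodup_ofList flat).filter _
    have hBmem : ∀ x, x ∈ (PySem.Set.ofList flat).filter (fun k => ((flat.count k : Int) == n))
        ↔ ∀ p ∈ cd, x ∈ g p.2 := by
      intro x
      rw [List.mem_filter]
      simp only [PySem.Set.mem_ofList, beq_iff_eq, hn, hsize]
      rw [hflat]
      constructor
      · rintro ⟨_, hcount⟩ p hpm
        have : List.count x ((cd.map Prod.snd).flatMap g) = (cd.map Prod.snd).length := by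
          rw [List.length_map]
          exact_mod_cast hcount
        exact (pv_count_flatMap_eq_iff g x _ hblocknd).mp this p.2 (List.mem_map_of_mem hpm)
      · intro hall
        have hall' : ∀ v ∈ cd.map Prod.snd, x ∈ g v := by
          intro v hv
          obtain ⟨p, hpm, rfl⟩ := List.mem_map.mp hv
          exact hall p hpm
        refine ⟨?_, ?_⟩
        · obtain ⟨q, hq⟩ := List.exists_mem_of_ne_nil cd hcd
          exact List.mem_flatMap.mpr ⟨q.2, List.mem_map_of_mem hq, hall q hq⟩
        · have := (pv_count_flatMap_eq_iff g x _ hblocknd).mpr hall'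
          rw [this, List.length_map]
    -- both sides sort permutation-equal nodup lists
    have hperm : S.Perm ((PySem.Set.ofList flat).filter (fun k => ((flat.count k : Int) == n))) := by
      rw [List.perm_ext_iff_of_nodup hAnodup hBnodup]
      intro a
      rw [hAmem a, hBmem a]
    -- assemble
    show get_common_timestamps cd = get_common_timestamps_alt cd
    rw [get_common_timestamps, get_common_timestamps_alt]
    rw [if_neg hcd, if_neg hcd]
    simp only
    rw [hcounts, hLB]
    exact PySem.List.sorted_eq_sorted_of_perm _ _ _ (fun a b h => h) hperm
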